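-- pv_equiv track=rewrite | github.com/YadavAnurag/practices | cheats/simple/c.py | passgen
-- ===== SOURCE A (Python) =====
-- def passgen(myList, n=0):
-- 	if n==1:
-- 		for i in myList:
-- 			yield i
--
-- 	if n==2:
-- 		for i in myList:
-- 			for j in myList:
-- 				yield i+j
--
-- 	if n==3:
-- 		for i in myList:
-- 			for j in myList:
-- 				for k in myList:
-- 					yield i+j+k
--
-- 	if n==4:
-- 		for i in myList:
-- 			for j in myList:
-- 				for k in myList:
-- 					for l in myList:
-- 						yield i+j+k+l
--
-- 	if n==5:
-- 		for i in myList: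
-- 			for j in myList:
-- 				for k in myList:
-- 					for l in myList:
-- 						for m in myList:
-- 							yield i+j+k+l+m
--
-- 	if n==6:
-- 		for i in myList:
-- 			for j in myList:
-- 				for k in myList:
-- 					for l in myList:
-- 						for m in myList:
-- 							for n in myList:
-- 								yield i+j+k+l+m+n
-- ===== SOURCE B (Python) =====
-- def passgen(myList, n=0):
--     if 1 <= n <= 6:
--         def build(prefix, depth):
--             if depth == 0:
--                 yield prefix
--             else:
--                 for x in myList:
--                     yield from build(prefix + x, depth - 1)
--         yield from build('', n)
-- ===== Notes on version B (the rewrite author's own statement) =====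
-- stated objective: simpler
-- what changed: Replaces the six hardcoded loop nests with one recursive prefix-building generator parameterised by depth, guarded by 1 <= n <= 6.
import Mathlib
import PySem

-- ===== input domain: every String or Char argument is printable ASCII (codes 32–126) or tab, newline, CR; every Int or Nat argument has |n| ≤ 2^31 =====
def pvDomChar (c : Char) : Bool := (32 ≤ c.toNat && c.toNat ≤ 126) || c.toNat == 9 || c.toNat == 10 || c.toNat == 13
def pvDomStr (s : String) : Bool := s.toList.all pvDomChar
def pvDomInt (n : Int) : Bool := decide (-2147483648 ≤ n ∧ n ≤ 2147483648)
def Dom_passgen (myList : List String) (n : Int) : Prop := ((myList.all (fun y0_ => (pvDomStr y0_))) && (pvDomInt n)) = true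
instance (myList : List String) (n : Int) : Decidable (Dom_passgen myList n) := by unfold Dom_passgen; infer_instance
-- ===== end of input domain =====

-- B replaces A's six hardcoded loop nests by one recursive prefix builder (objective: simpler).

-- ===== PORT A =====
-- A is a generator: its port returns the list of yielded values, the six 'if n==k' nests in order.
def passgen (myList : List String) (n : Int) : List String :=
  (if n == 1 then myList else [])
  ++ (if n == 2 then myList.flatMap (fun i => myList.map (fun j => i ++ j)) else [])
  ++ (if n == 3 then myList.flatMap (fun i => myList.flatMap (fun j =>
        myList.map (fun k => i ++ j ++ k))) else [])
  ++ (if n == 4 then myList.flatMap (fun i => myList.flatMap (fun j =>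
        myList.flatMap (fun k => myList.map (fun l => i ++ j ++ k ++ l)))) else [])
  ++ (if n == 5 then myList.flatMap (fun i => myList.flatMap (fun j =>
        myList.flatMap (fun k => myList.flatMap (fun l =>
          myList.map (fun m => i ++ j ++ k ++ l ++ m))))) else [])
  ++ (if n == 6 then myList.flatMap (fun i => myList.flatMap (fun j =>
        myList.flatMap (fun k => myList.flatMap (fun l =>
          myList.flatMap (fun m => myList.map (fun n' => i ++ j ++ k ++ l ++ m ++ n')))))) else [])

-- ===== PORT B =====
def passgenBuild (myList : List String) (pfx : String) : Nat → List String
  | 0 => [pfx]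
  | d + 1 => myList.flatMap (fun x => passgenBuild myList (pfx ++ x) d)

def passgen_alt (myList : List String) (n : Int) : List String :=
  if 1 ≤ n ∧ n ≤ 6 then passgenBuild myList "" n.toNat else []

-- ===== PRECONDITION & SPEC =====
def Spec_passgen (myList : List String) (n : Int) (out : List String) : Prop := out = passgen_alt myList n
instance (myList : List String) (n : Int) (out : List String) : Decidable (Spec_passgen myList n out) := by unfold Spec_passgen; infer_instance

-- ===== CLAIM (what is proved, stated in full; the proofs are below) =====
def Claim_equal_passgen : Prop := ∀ (myList : List String) (n : Int), Dom_passgen myList n → Spec_passgen myList n (passgen myList n)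

-- ===== LEMMAS AND PROOFS =====

theorem pv_flatMap_single {α β : Type} (f : α → β) (l : List α) :
    l.flatMap (fun a => [f a]) = l.map f := by
  induction l with
  | nil => rfl
  | cons x xs ih => simp [List.flatMap_cons, ih]

theorem passgen_spec : Claim_equal_passgen := by
  intro myList n _
  show passgen myList n = passgen_alt myList n
  unfold passgen passgen_alt
  by_cases h1 : n = 1
  · subst h1; simp [passgenBuild, pv_flatMap_single]
  by_cases h2 : n = 2
  · subst h2; simp [passgenBuild, pv_flatMap_single]
  by_cases h3 : n = 3
  · subst h3; simp [passgenBuild, pv_flatMap_single, String.append_assoc]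
  by_cases h4 : n = 4
  · subst h4; simp [passgenBuild, pv_flatMap_single, String.append_assoc]
  by_cases h5 : n = 5
  · subst h5; simp [passgenBuild, pv_flatMap_single, String.append_assoc]
  by_cases h6 : n = 6
  · subst h6; simp [passgenBuild, pv_flatMap_single, String.append_assoc]
  · have : ¬ (1 ≤ n ∧ n ≤ 6) := by omega
    simp [h1, h2, h3, h4, h5, h6, this]
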